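-- pv_equiv track=rewrite | github.com/MishCodesFinBytes/FinBytes | complexity2.py | sum_onlogn_helper
-- ===== SOURCE A (Python) =====
-- def sum_onlogn_helper(arr, iterations):
--     """Helper function to sum an array using divide and conquer."""
--     if len(arr) <= 1:
--         return sum(arr), iterations
--     mid = len(arr) // 2
--     iterations += 1
--     left_sum, iterations = sum_onlogn_helper(arr[:mid], iterations)
--     right_sum, iterations = sum_onlogn_helper(arr[mid:], iterations)
--     return left_sum + right_sum, iterations
-- ===== SOURCE B (Python) =====
-- def sum_onlogn_helper(arr, iterations):
--     """Closed form: total sum plus len(arr)-1 split iterations (0 for len<=1)."""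
--     return sum(arr), iterations + max(len(arr) - 1, 0)
-- ===== Notes on version B (the rewrite author's own statement) =====
-- stated objective: faster
-- what changed: replaces the divide-and-conquer recursion by a single sum(arr) plus the closed-form iteration count max(len(arr)-1,0)
import Mathlib
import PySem

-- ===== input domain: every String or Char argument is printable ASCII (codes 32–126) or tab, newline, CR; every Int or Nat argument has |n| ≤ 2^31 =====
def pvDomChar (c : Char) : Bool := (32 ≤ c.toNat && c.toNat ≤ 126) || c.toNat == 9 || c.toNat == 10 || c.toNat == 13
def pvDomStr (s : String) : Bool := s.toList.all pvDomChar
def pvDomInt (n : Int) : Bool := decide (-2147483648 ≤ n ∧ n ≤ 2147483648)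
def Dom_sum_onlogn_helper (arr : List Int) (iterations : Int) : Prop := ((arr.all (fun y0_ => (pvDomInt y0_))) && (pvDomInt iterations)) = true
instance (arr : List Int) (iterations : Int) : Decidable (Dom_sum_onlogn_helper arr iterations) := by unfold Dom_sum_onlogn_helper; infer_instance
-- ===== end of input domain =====

-- ===== PORT A =====
-- cited by the port's decreasing_by: len(arr)//2 as a Nat division
theorem pv_mid_natCast (n : Nat) : PySem.Int.floordiv (n : Int) 2 = ((n / 2 : Nat) : Int) := by
  exact_mod_cast PySem.Int.floordiv_natCast n 2

def sum_onlogn_helper (arr : List Int) (iterations : Int) : Int × Int :=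
  if arr.length ≤ 1 then (arr.sum, iterations)
  else
    let mid := PySem.Int.floordiv (arr.length : Int) 2
    let l := sum_onlogn_helper (PySem.List.slice arr none (some mid)) (iterations + 1)
    let r := sum_onlogn_helper (PySem.List.slice arr (some mid) none) l.2
    (l.1 + r.1, r.2)
termination_by arr.length
decreasing_by
  · simp only [pv_mid_natCast, PySem.List.slice_to_natCast, List.length_take]
    omega
  · simp only [pv_mid_natCast, PySem.List.slice_from_natCast, List.length_drop]
    omega

-- ===== PORT B =====
def sum_onlogn_helper_alt (arr : List Int) (iterations : Int) : Int × Int :=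
  (arr.sum, iterations + max ((arr.length : Int) - 1) 0)

-- ===== PRECONDITION & SPEC =====
def Spec_sum_onlogn_helper (arr : List Int) (iterations : Int) (out : Int × Int) : Prop := out = sum_onlogn_helper_alt arr iterations
instance (arr : List Int) (iterations : Int) (out : Int × Int) : Decidable (Spec_sum_onlogn_helper arr iterations out) := by unfold Spec_sum_onlogn_helper; infer_instance

-- ===== CLAIM (what is proved, stated in full; the proofs are below) =====
def Claim_equal_sum_onlogn_helper : Prop := ∀ (arr : List Int) (iterations : Int), Dom_sum_onlogn_helper arr iterations → Spec_sum_onlogn_helper arr iterations (sum_onlogn_helper arr iterations)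

-- ===== LEMMAS AND PROOFS =====
theorem sum_onlogn_helper_closed (n : Nat) : ∀ (arr : List Int) (iterations : Int),
    arr.length = n → sum_onlogn_helper arr iterations = sum_onlogn_helper_alt arr iterations := by
  induction n using Nat.strong_induction_on with
  | _ n ih =>
    intro arr it hn
    rw [sum_onlogn_helper]
    by_cases h : arr.length ≤ 1
    · simp only [h, if_pos, sum_onlogn_helper_alt]
      have : max ((arr.length : Int) - 1) 0 = 0 := by omega
      rw [this]; ring_nf
    · simp only [h, if_neg, not_false_iff]
      simp only [pv_mid_natCast, PySem.List.slice_to_natCast,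
        PySem.List.slice_from_natCast]
      have h2 : 2 ≤ arr.length := by omega
      have hlt : arr.length / 2 < n := by omega
      have hdt : (arr.drop (arr.length / 2)).length = arr.length - arr.length / 2 := by simp
      have htk : (arr.take (arr.length / 2)).length = arr.length / 2 := by
        simp; omega
      have hlt2 : (arr.drop (arr.length / 2)).length < n := by omega
      rw [ih _ hlt _ _ htk, ih _ hlt2 _ _ rfl]
      simp only [sum_onlogn_helper_alt, htk, hdt]
      refine Prod.ext ?_ ?_
      · have := List.take_append_drop (arr.length / 2) arr
        calc (arr.take (arr.length / 2)).sum + (arr.drop (arr.length / 2)).sum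
            = (arr.take (arr.length / 2) ++ arr.drop (arr.length / 2)).sum := by
              rw [List.sum_append]
          _ = arr.sum := by rw [this]
      · have hh : arr.length / 2 ≤ arr.length := Nat.div_le_self _ _
        have h1 : 1 ≤ arr.length / 2 := Nat.one_le_div_iff (by omega) |>.mpr (by omega)
        push_cast
        omega

-- ===== VERDICT (by name: the statement is the Claim_ definition above) =====
theorem sum_onlogn_helper_spec : Claim_equal_sum_onlogn_helper := by
  intro arr it _
  unfold Spec_sum_onlogn_helper
  exact sum_onlogn_helper_closed arr.length arr it rfl
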